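-- pv_equiv track=rewrite | github.com/Emmanuel-Begati/sentra-bot_ai-model | utils/yolo_inference.py | _categorize_disease
-- ===== SOURCE A (Python) =====
-- def _categorize_disease(class_name: str) -> str:
--     """Categorize disease type"""
--     class_lower = class_name.lower()
--
--     if any(term in class_lower for term in ['virus', 'mosaic', 'curl', 'yellow']):
--         return 'viral'
--     elif any(term in class_lower for term in ['bacterial', 'blight', 'rot', 'spot']):
--         return 'bacterial'
--     elif any(term in class_lower for term in ['rust', 'mildew', 'mold', 'anthracnose', 'scab']):
--         return 'fungal'
--     elif any(term in class_lower for term in ['mite', 'worm', 'insect']):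
--         return 'pest'
--     elif 'deficiency' in class_lower:
--         return 'nutritional'
--     else:
--         return 'unknown'
-- ===== SOURCE B (Python) =====
-- NAMES = ['viral', 'bacterial', 'fungal', 'pest', 'nutritional', 'unknown']
--
-- # flat (term, category-rank) index; lower rank = higher priority
-- TERM_RANK = [
--     ('virus', 0), ('mosaic', 0), ('curl', 0), ('yellow', 0),
--     ('bacterial', 1), ('blight', 1), ('rot', 1), ('spot', 1),
--     ('rust', 2), ('mildew', 2), ('mold', 2), ('anthracnose', 2), ('scab', 2),
--     ('mite', 3), ('worm', 3), ('insect', 3),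
--     ('deficiency', 4),
-- ]
--
--
-- def _categorize_disease(class_name: str) -> str:
--     class_lower = class_name.lower()
--     best = len(NAMES) - 1  # rank of 'unknown'
--     for term, rank in TERM_RANK:
--         if rank < best and term in class_lower:
--             best = rank
--     return NAMES[best]
-- ===== Notes on version B (the rewrite author's own statement) =====
-- stated objective: alternative
-- what changed: Instead of a short-circuiting if/elif chain of per-category any() tests, B makes one complete pass over a flat (term, rank) index, keeps the minimum matching category rank in an accumulator (skipping terms that cannot improve it), and finally looks the rank up in a name table.
import Mathlib
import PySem

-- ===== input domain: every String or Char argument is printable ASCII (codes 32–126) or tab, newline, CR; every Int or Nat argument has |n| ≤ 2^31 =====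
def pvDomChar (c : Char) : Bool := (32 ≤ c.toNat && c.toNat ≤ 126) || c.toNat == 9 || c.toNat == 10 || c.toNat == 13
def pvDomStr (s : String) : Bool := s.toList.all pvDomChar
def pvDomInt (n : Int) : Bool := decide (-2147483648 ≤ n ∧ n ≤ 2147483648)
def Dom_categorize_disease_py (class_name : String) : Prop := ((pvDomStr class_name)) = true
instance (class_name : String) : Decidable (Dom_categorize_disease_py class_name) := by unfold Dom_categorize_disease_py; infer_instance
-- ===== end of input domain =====

-- B replaces A's short-circuiting if/elif chain by one full pass over a flat (term, rank)
-- index that keeps the minimum matching category rank, then a table lookup; same behaviour.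

-- ===== PORT A =====
def categorize_disease_py (class_name : String) : String :=
  let class_lower := PySem.Str.lower class_name
  if (["virus", "mosaic", "curl", "yellow"].any (fun term => PySem.Str.isIn term class_lower)) then
    "viral"
  else if (["bacterial", "blight", "rot", "spot"].any (fun term => PySem.Str.isIn term class_lower)) then
    "bacterial"
  else if (["rust", "mildew", "mold", "anthracnose", "scab"].any (fun term => PySem.Str.isIn term class_lower)) then
    "fungal"
  else if (["mite", "worm", "insect"].any (fun term => PySem.Str.isIn term class_lower)) then
    "pest"
  else if PySem.Str.isIn "deficiency" class_lower then
    "nutritional"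
  else
    "unknown"

-- ===== PORT B =====
def pvNAMES : List String := ["viral", "bacterial", "fungal", "pest", "nutritional", "unknown"]

def pvTERM_RANK : List (String × Nat) :=
  [("virus", 0), ("mosaic", 0), ("curl", 0), ("yellow", 0),
   ("bacterial", 1), ("blight", 1), ("rot", 1), ("spot", 1),
   ("rust", 2), ("mildew", 2), ("mold", 2), ("anthracnose", 2), ("scab", 2),
   ("mite", 3), ("worm", 3), ("insect", 3),
   ("deficiency", 4)]

-- the 'for term, rank in TERM_RANK' loop of Source B (accumulator: current best rank)
def pvBestLoop : List (String × Nat) → Nat → String → Nat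
  | [], best, _ => best
  | (term, rank) :: rest, best, class_lower =>
      pvBestLoop rest
        (if rank < best && PySem.Str.isIn term class_lower then rank else best) class_lower

def categorize_disease_py_alt (class_name : String) : String :=
  let class_lower := PySem.Str.lower class_name
  let best := pvBestLoop pvTERM_RANK (pvNAMES.length - 1) class_lower
  pvNAMES.getD best ""   -- NAMES[best]: best is always < 6, so in range

-- ===== PRECONDITION & SPEC =====
def Spec_categorize_disease_py (class_name : String) (out : String) : Prop := out = categorize_disease_py_alt class_name
instance (class_name : String) (out : String) : Decidable (Spec_categorize_disease_py class_name out) := by unfold Spec_categorize_disease_py; infer_instance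

-- ===== CLAIM (what is proved, stated in full; the proofs are below) =====
def Claim_equal_categorize_disease_py : Prop := ∀ (class_name : String), Dom_categorize_disease_py class_name → Spec_categorize_disease_py class_name (categorize_disease_py class_name)

-- ===== LEMMAS AND PROOFS =====

-- Running the loop over one category's block of terms (all with the same rank r)
-- lowers the accumulator to r exactly when r improves it and some term matches.
theorem pvBestLoop_block (ts : List String) (r : Nat) (rest : List (String × Nat))
    (best : Nat) (s : String) :
    pvBestLoop ((ts.map (fun t => (t, r))) ++ rest) best s
      = pvBestLoop rest
          (if r < best && ts.any (fun t => PySem.Str.isIn t s) then r else best) s := by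
  induction ts generalizing best with
  | nil => simp [pvBestLoop]
  | cons t ts ih =>
    simp only [List.map_cons, List.cons_append, pvBestLoop, List.any_cons]
    rw [ih]
    by_cases hr : r < best <;>
      by_cases ht : PySem.Chars.isIn t.toList s.toList = true <;>
        simp [PySem.Str.isIn, hr, ht]

theorem categorize_eq (class_name : String) :
    categorize_disease_py class_name = categorize_disease_py_alt class_name := by
  unfold categorize_disease_py categorize_disease_py_alt
  have h : pvTERM_RANK
      = (["virus", "mosaic", "curl", "yellow"].map (fun t => (t, 0)))
        ++ ((["bacterial", "blight", "rot", "spot"].map (fun t => (t, 1)))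
        ++ ((["rust", "mildew", "mold", "anthracnose", "scab"].map (fun t => (t, 2)))
        ++ ((["mite", "worm", "insect"].map (fun t => (t, 3)))
        ++ ((["deficiency"].map (fun t => (t, 4))) ++ ([] : List (String × Nat)))))) := by
    rfl
  simp only [h, pvBestLoop_block]
  set s := PySem.Str.lower class_name
  by_cases h1 : (["virus", "mosaic", "curl", "yellow"].any (fun t => PySem.Str.isIn t s)) = true <;>
  by_cases h2 : (["bacterial", "blight", "rot", "spot"].any (fun t => PySem.Str.isIn t s)) = true <;>
  by_cases h3 : (["rust", "mildew", "mold", "anthracnose", "scab"].any (fun t => PySem.Str.isIn t s)) = true <;>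
  by_cases h4 : (["mite", "worm", "insect"].any (fun t => PySem.Str.isIn t s)) = true <;>
  by_cases h5 : PySem.Str.isIn "deficiency" s = true <;>
    simp_all [pvBestLoop, pvNAMES, List.getD]

-- ===== VERDICT (by name: the statement is the Claim_ definition above) =====
theorem categorize_disease_py_spec : Claim_equal_categorize_disease_py := by
  intro class_name _
  exact categorize_eq class_name
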